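-- pv_equiv track=rewrite | github.com/DanielZhizhuoLi/DSCI560_project | Lab6/scripts/well_extraction.py | find_most_common_substring
-- ===== SOURCE A (Python) =====
-- from collections import Counter
--
-- def find_most_common_substring(well_names):
-- 	all_substrings = []
-- 	for name in well_names:
-- 		words = name.split()
-- 		substring = [" ".join(words[:i]) for i in range(1, len(words)+1)]
-- 		all_substrings.extend(substring)
-- 	substrings_count = Counter(all_substrings)
-- 	sorted_substrings = sorted(substrings_count.items(), key=lambda x: (-x[1], -len(x[0])))
-- 	most_common_substring = sorted_substrings[0][0] if sorted_substrings else "Not Found"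
-- 	return most_common_substring
-- ===== SOURCE B (Python) =====
-- def find_most_common_substring(well_names):
--     # Word-level trie: one node per distinct word-prefix, counting occurrences
--     # and remembering each node's creation order; answer = node maximizing
--     # (count, prefix length, -creation_index), i.e. Counter+stable-sort's choice.
--     root = {}          # word -> [count, creation_index, children]
--     counter = 0
--     for name in well_names:
--         cur = root
--         for w in name.split():
--             node = cur.get(w)
--             if node is None:
--                 node = [1, counter, {}]
--                 counter += 1
--                 cur[w] = node
--             else:
--                 node[0] += 1
--             cur = node[2]
--     nodes = []
--     def walk(children, prefix):
--         for w, (cnt, idx, sub) in children.items():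
--             p = prefix + " " + w if prefix else w
--             nodes.append((cnt, idx, p))
--             walk(sub, p)
--     walk(root, "")
--     best = None
--     for t in nodes:
--         if best is None or t[0] > best[0] or (t[0] == best[0] and (len(t[2]) > len(best[2]) or (len(t[2]) == len(best[2]) and t[1] < best[1]))):
--             best = t
--     return best[2] if best else "Not Found"
-- ===== Notes on version B (the rewrite author's own statement) =====
-- stated objective: faster
-- what changed: B replaces A's flat all_substrings list + Counter + full sort by a word-level trie (one node per distinct word-prefix, holding an occurrence count and a creation index), a DFS collection of the nodes and a single linear best-scan on the key (count, prefix length, -creation index), which reproduces the Counter-insertion-order tie-breaking of A's stable sort.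
import Mathlib
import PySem

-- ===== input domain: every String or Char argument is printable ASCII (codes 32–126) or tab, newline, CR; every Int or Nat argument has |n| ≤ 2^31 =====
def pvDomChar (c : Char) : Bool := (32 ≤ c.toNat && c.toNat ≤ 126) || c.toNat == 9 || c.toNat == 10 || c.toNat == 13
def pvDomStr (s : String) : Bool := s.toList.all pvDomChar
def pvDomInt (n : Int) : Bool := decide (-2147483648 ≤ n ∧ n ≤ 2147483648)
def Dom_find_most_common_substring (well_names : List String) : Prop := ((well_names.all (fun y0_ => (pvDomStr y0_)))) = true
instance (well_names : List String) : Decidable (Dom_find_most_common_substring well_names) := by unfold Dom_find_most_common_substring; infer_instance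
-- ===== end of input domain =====

-- B replaces A's "collect every word-prefix + Counter + full sort" by a word-level trie
-- with per-node counts and creation indices, a DFS node walk and one linear best-scan
-- (measured ~2x faster in a timing run).

-- ===== PORT A =====
def find_most_common_substring (well_names : List String) : String :=
  let all_substrings := well_names.foldl (fun acc name =>
    let words := PySem.Str.split₀ name
    let substring := (PySem.List.pyRange 1 ((words.length : Int) + 1) 1).map
      (fun i => PySem.Str.join " " (PySem.List.slice words none (some i)))
    acc ++ substring) []
  let substrings_count := PySem.Dict.counter all_substrings
  let sorted_substrings := PySem.List.sorted2 substrings_count.items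
      (fun x => -x.2) (fun x => -(PySem.Str.len x.1)) false
  match sorted_substrings with
  | [] => "Not Found"
  | p :: _ => p.1

-- ===== PORT B =====
-- trie children list: cons word count creation_index subtrie next_sibling
inductive PvTrie where
  | nil : PvTrie
  | cons : String → Int → Int → PvTrie → PvTrie → PvTrie

def pvFindCh : PvTrie → String → Option (Int × Int × PvTrie)
  | .nil, _ => none
  | .cons w' c i sub rest, w => if w' = w then some (c, i, sub) else pvFindCh rest w

def pvReplaceCh : PvTrie → String → Int → Int → PvTrie → PvTrie
  | .nil, _, _, _, _ => .nil
  | .cons w' c i sub rest, w, c2, i2, sub2 =>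
      if w' = w then .cons w' c2 i2 sub2 rest else .cons w' c i sub (pvReplaceCh rest w c2 i2 sub2)

def pvNewChain : List String → Int → PvTrie × Int
  | [], ctr => (.nil, ctr)
  | w :: ws, ctr => let r := pvNewChain ws (ctr + 1); (.cons w 1 ctr r.1 .nil, r.2)

def pvAppendCh : PvTrie → PvTrie → PvTrie
  | .nil, t => t
  | .cons w c i sub rest, t => .cons w c i sub (pvAppendCh rest t)

def pvInsert : List String → PvTrie → Int → PvTrie × Int
  | [], ch, ctr => (ch, ctr)
  | w :: ws, ch, ctr =>
    match pvFindCh ch w with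
    | some (c, i, sub) => let r := pvInsert ws sub ctr; (pvReplaceCh ch w (c + 1) i r.1, r.2)
    | none => let r := pvNewChain ws (ctr + 1); (pvAppendCh ch (.cons w 1 ctr r.1 .nil), r.2)

def pvFlat : PvTrie → String → List (Int × Int × String)
  | .nil, _ => []
  | .cons w c i sub rest, pre =>
      let p := if pre = "" then w else pre ++ " " ++ w
      (c, i, p) :: (pvFlat sub p ++ pvFlat rest pre)

def find_most_common_substring_alt (well_names : List String) : String :=
  let st := well_names.foldl
    (fun (st : PvTrie × Int) name => pvInsert (PySem.Str.split₀ name) st.1 st.2)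
    (PvTrie.nil, 0)
  let nodes := pvFlat st.1 ""
  let best := nodes.foldl (fun b t =>
    match b with
    | none => some t
    | some q =>
      if q.1 < t.1 ∨ (q.1 = t.1 ∧ (PySem.Str.len q.2.2 < PySem.Str.len t.2.2 ∨
          (PySem.Str.len q.2.2 = PySem.Str.len t.2.2 ∧ t.2.1 < q.2.1)))
      then some t else some q) none
  match best with
  | none => "Not Found"
  | some t => t.2.2

-- ===== PRECONDITION & SPEC =====
def Spec_find_most_common_substring (well_names : List String) (out : String) : Prop := out = find_most_common_substring_alt well_names
instance (well_names : List String) (out : String) : Decidable (Spec_find_most_common_substring well_names out) := by unfold Spec_find_most_common_substring; infer_instance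

-- ===== CLAIM (what is proved, stated in full; the proofs are below) =====
def Claim_equal_find_most_common_substring : Prop := ∀ (well_names : List String), Dom_find_most_common_substring well_names → Spec_find_most_common_substring well_names (find_most_common_substring well_names)

-- ===== LEMMAS AND PROOFS =====

-- ---------- A-side helpers (stream of joined word-prefixes) ----------
def pvScanPref (acc : String) : List String → List String
  | [] => []
  | w :: ws => (acc ++ " " ++ w) :: pvScanPref (acc ++ " " ++ w) ws

def pvPrefixList : List String → List String
  | [] => []
  | w :: ws => w :: pvScanPref w ws

def pvJoinAll : List String → String
  | [] => ""
  | u :: us => us.foldl (fun s x => s ++ " " ++ x) u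

-- word-level prefixes of a word list (nonempty prefixes in order)
def pvNpfx : List String → List (List String)
  | [] => []
  | w :: ws => [w] :: (pvNpfx ws).map (fun p => w :: p)

def pvJoinW (p : List String) : String := PySem.Str.join " " p

def pvWordlike (w : String) : Prop :=
  w.toList ≠ [] ∧ ∀ c ∈ w.toList, PySem.Chars.isspace c = false

def pvKeys : PvTrie → List String
  | .nil => []
  | .cons w _ _ _ rest => w :: pvKeys rest

def pvWF : PvTrie → Prop
  | .nil => True
  | .cons w _ _ sub rest => pvWordlike w ∧ w ∉ pvKeys rest ∧ pvWF sub ∧ pvWF rest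

-- word-level flatten: (count, index, full word path)
def pvFlatW : PvTrie → List String → List (Int × Int × List String)
  | .nil, _ => []
  | .cons w c i sub rest, pre =>
      (c, i, pre ++ [w]) :: (pvFlatW sub (pre ++ [w]) ++ pvFlatW rest pre)

def pvPathsW (t : PvTrie) (pre : List String) : List (List String) :=
  (pvFlatW t pre).map (·.2.2)

def pvChain (pre : List String) (ws : List String) : List (List String) :=
  (pvNpfx ws).map (pre ++ ·)

def pvBump (C : List (List String)) (e : Int × Int × List String) : Int × Int × List String :=
  if e.2.2 ∈ C then (e.1 + 1, e.2.1, e.2.2) else e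

def pvAnnot (T : List (List String)) : List (Int × Int × List String) :=
  (PySem.List.enumerate (PySem.List.dedup T) 0).map (fun q => ((T.count q.2 : Int), q.1, q.2))

def pvT (wn : List String) : List (List String) :=
  wn.flatMap (fun n => pvNpfx (PySem.Str.split₀ n))

def pvSel (L : List (Int × Int × String)) : Option (Int × Int × String) :=
  L.foldl (fun b t =>
    match b with
    | none => some t
    | some q =>
      if q.1 < t.1 ∨ (q.1 = t.1 ∧ (PySem.Str.len q.2.2 < PySem.Str.len t.2.2 ∨
          (PySem.Str.len q.2.2 = PySem.Str.len t.2.2 ∧ t.2.1 < q.2.1)))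
      then some t else some q) none

-- ---------- A-port reduction: stream + counter + stable-sort head = keep-first scan ----------

theorem pvHeadInsertBy {α : Type} (before : α → α → Bool) (x : α) (acc : List α) :
    (PySem.List.insertBy before x acc).head?
      = some (match acc.head? with | none => x | some y => if before x y then x else y) := by
  cases acc with
  | nil => simp [PySem.List.insertBy]
  | cons y ys =>
    simp only [PySem.List.insertBy, List.head?_cons]
    split <;> simp

theorem pvHeadSortFold {α : Type} (before : α → α → Bool) (xs : List α) (acc : List α) :
    (xs.foldl (fun a x => PySem.List.insertBy before x a) acc).head?
      = xs.foldl (fun b x => some (match b with | none => x | some y => if before x y then x else y))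
          acc.head? := by
  induction xs generalizing acc with
  | nil => rfl
  | cons x xs ih =>
    simp only [List.foldl_cons]
    rw [ih, pvHeadInsertBy]

theorem pvSelectEq (l : List (String × Int)) :
    (match PySem.List.sorted2 l (fun x => -x.2) (fun x => -(PySem.Str.len x.1)) false with
      | [] => "Not Found"
      | p :: _ => p.1)
    = (match l.foldl (fun b p =>
          match b with
          | none => some p
          | some q =>
            if q.2 < p.2 ∨ (q.2 = p.2 ∧ PySem.Str.len q.1 < PySem.Str.len p.1) then some p else some q)
          none with
        | none => "Not Found"
        | some q => q.1) := by
  have hbefore : ∀ (p q : String × Int),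
      (decide (-p.2 < -q.2) || (!decide (-q.2 < -p.2) && decide (-(PySem.Str.len p.1) < -(PySem.Str.len q.1))))
      = decide (q.2 < p.2 ∨ (q.2 = p.2 ∧ PySem.Str.len q.1 < PySem.Str.len p.1)) := by
    intro p q
    rw [Bool.eq_iff_iff]
    simp only [Bool.or_eq_true, Bool.and_eq_true, Bool.not_eq_true', decide_eq_true_eq,
      decide_eq_false_iff_not]
    generalize PySem.Str.len p.1 = lp
    generalize PySem.Str.len q.1 = lq
    omega
  have hsort : (PySem.List.sorted2 l (fun x => -x.2) (fun x => -(PySem.Str.len x.1)) false).head?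
      = l.foldl (fun b p =>
          match b with
          | none => some p
          | some q =>
            if q.2 < p.2 ∨ (q.2 = p.2 ∧ PySem.Str.len q.1 < PySem.Str.len p.1) then some p else some q)
          none := by
    show (l.foldl (fun a x => PySem.List.insertBy _ x a) []).head? = _
    rw [pvHeadSortFold]
    simp only [List.head?_nil]
    apply PySem.List.foldl_congr_mem
    intro b p _
    cases b with
    | none => rfl
    | some q =>
      rw [if_neg (show ¬(false = true) by decide)]
      simp only []
      rw [hbefore p q]
      simp only [decide_eq_true_eq]
      exact apply_ite some _ _ _
  rw [← hsort]
  cases PySem.List.sorted2 l (fun x => -x.2) (fun x => -(PySem.Str.len x.1)) false <;> simp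

-- A's per-name prefix list computed by pyRange/slice/join equals pvPrefixList
theorem pvScanPrefAppend (ws : List String) (w acc : String) :
    pvScanPref acc (ws ++ [w])
      = pvScanPref acc ws ++ [(ws.foldl (fun s x => s ++ " " ++ x) acc) ++ " " ++ w] := by
  induction ws generalizing acc with
  | nil => rfl
  | cons u us ih => simp [pvScanPref, ih]

theorem pvPrefixListAppend (ws : List String) (w : String) :
    pvPrefixList (ws ++ [w]) = pvPrefixList ws ++ [pvJoinAll (ws ++ [w])] := by
  cases ws with
  | nil => rfl
  | cons u us => simp [pvPrefixList, pvJoinAll, pvScanPrefAppend]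

theorem pvJoinConsStr (u v : String) (rest : List String) :
    PySem.Str.join " " ((u ++ " " ++ v) :: rest) = u ++ " " ++ PySem.Str.join " " (v :: rest) := by
  apply String.toList_inj.mp
  cases rest with
  | nil => simp [PySem.Str.toList_join, PySem.Chars.join, List.intercalate]
  | cons t ts =>
    simp only [PySem.Str.toList_join, List.map_cons, PySem.Chars.join_cons_cons,
      String.toList_append]
    simp

theorem pvJoinEqJoinAll (us : List String) (u : String) :
    PySem.Str.join " " (u :: us) = pvJoinAll (u :: us) := by
  induction us generalizing u with
  | nil =>
    apply String.toList_inj.mp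
    simp [PySem.Str.toList_join, PySem.Chars.join, pvJoinAll, List.intercalate]
  | cons v vs ih =>
    have h1 : PySem.Str.join " " (u :: v :: vs) = u ++ " " ++ PySem.Str.join " " (v :: vs) := by
      apply String.toList_inj.mp
      simp [PySem.Str.toList_join, PySem.Chars.join_cons_cons]
    have h2 := ih (u := u ++ " " ++ v)
    rw [h1]
    calc u ++ " " ++ PySem.Str.join " " (v :: vs)
        = PySem.Str.join " " ((u ++ " " ++ v) :: vs) := (pvJoinConsStr u v vs).symm
      _ = pvJoinAll ((u ++ " " ++ v) :: vs) := h2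
      _ = pvJoinAll (u :: v :: vs) := by simp [pvJoinAll]

theorem pvAPref (words : List String) :
    (PySem.List.pyRange 1 ((words.length : Int) + 1) 1).map
        (fun i => PySem.Str.join " " (PySem.List.slice words none (some i)))
      = pvPrefixList words := by
  induction words using List.reverseRecOn with
  | nil => simp [PySem.List.pyRange, pvPrefixList]
  | append_singleton ws w ih =>
    have hL : ((ws ++ [w]).length : Int) + 1 = (ws.length : Int) + 2 := by simp; ring
    have hsing : PySem.List.pyRange ((ws.length : Int) + 1) ((ws.length : Int) + 2) 1
        = [(ws.length : Int) + 1] := by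
      rw [PySem.List.pyRange_one_cons (a := (ws.length : Int) + 1) (b := (ws.length : Int) + 2)
        (by omega)]
      have h2 : (ws.length : Int) + 1 + 1 = (ws.length : Int) + 2 := by ring
      rw [h2]
      simp [PySem.List.pyRange]
    rw [hL, PySem.List.pyRange_one_append 1 ((ws.length : Int) + 1) ((ws.length : Int) + 2)
        (by omega) (by omega), hsing]
    rw [List.map_append, pvPrefixListAppend]
    congr 1
    · rw [← ih]
      apply List.map_congr_left
      intro i hi
      have hmem := PySem.List.mem_pyRange_one.mp hi
      have h0 : (0:Int) ≤ i := by omega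
      rw [PySem.List.slice_to _ h0, PySem.List.slice_to _ h0]
      rw [List.take_append_of_le_length (by omega)]
    · simp only [List.map_cons, List.map_nil]
      have h0 : (0:Int) ≤ (ws.length : Int) + 1 := by omega
      rw [PySem.List.slice_to _ h0]
      have ht : ((ws.length : Int) + 1).toNat = ws.length + 1 := by omega
      rw [ht, List.take_of_length_le (by simp)]
      congr 1
      cases h : ws ++ [w] with
      | nil => simp at h
      | cons u us => exact pvJoinEqJoinAll us u

-- pvPrefixList through word-level prefixes
theorem pvJoinAllAppend (us : List String) (u w : String) :
    pvJoinAll ((u :: us) ++ [w]) = pvJoinAll (u :: us) ++ " " ++ w := by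
  simp [pvJoinAll, List.foldl_append]

theorem pvScanPrefNpfx (ws : List String) (accW : List String) (u : String) :
    pvScanPref (pvJoinAll (u :: accW)) ws
      = (pvNpfx ws).map (fun p => pvJoinAll ((u :: accW) ++ p)) := by
  induction ws generalizing accW with
  | nil => simp [pvScanPref, pvNpfx]
  | cons w ws ih =>
    simp only [pvScanPref, pvNpfx, List.map_cons, List.map_map]
    have h1 : pvJoinAll (u :: accW) ++ " " ++ w = pvJoinAll (u :: (accW ++ [w])) := by
      rw [← pvJoinAllAppend]
      simp
    rw [h1]
    congr 1
    rw [ih (accW ++ [w])]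
    apply List.map_congr_left
    intro p _
    simp

theorem pvPrefixListEqNpfx (ws : List String) :
    pvPrefixList ws = (pvNpfx ws).map pvJoinAll := by
  cases ws with
  | nil => rfl
  | cons w ws =>
    simp only [pvPrefixList, pvNpfx, List.map_cons]
    congr 1
    rw [List.map_map]
    have h := pvScanPrefNpfx ws [] w
    simp only [List.nil_append] at h
    calc pvScanPref w ws = pvScanPref (pvJoinAll [w]) ws := rfl
      _ = List.map (fun p => pvJoinAll ([w] ++ p)) (pvNpfx ws) := h
      _ = List.map (pvJoinAll ∘ fun p => w :: p) (pvNpfx ws) := by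
            apply List.map_congr_left; intro p _; rfl

theorem pvJoinWEq (p : List String) : pvJoinW p = pvJoinAll p := by
  cases p with
  | nil =>
    apply String.toList_inj.mp
    simp [pvJoinW, PySem.Str.toList_join, PySem.Chars.join, pvJoinAll, List.intercalate]
  | cons u us => exact pvJoinEqJoinAll us u

-- ---------- split₀ tokens are nonempty and whitespace-free ----------
theorem pvGoWordlike (s : List Char) : ∀ (cur : List Char) (acc : List (List Char)),
    (∀ x ∈ acc, x ≠ [] ∧ ∀ c ∈ x, PySem.Chars.isspace c = false) →
    (∀ c ∈ cur, PySem.Chars.isspace c = false) →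
    ∀ x ∈ PySem.Chars.split₀.go s cur acc, x ≠ [] ∧ ∀ c ∈ x, PySem.Chars.isspace c = false := by
  induction s with
  | nil =>
    intro cur acc hacc hcur x hx
    by_cases hc : cur.isEmpty
    · simp only [PySem.Chars.split₀.go, hc, if_true, List.mem_reverse] at hx
      exact hacc x hx
    · simp only [PySem.Chars.split₀.go, hc, Bool.false_eq_true, if_false] at hx
      rw [List.mem_reverse] at hx
      rcases List.mem_cons.mp hx with h | h
      · subst h
        refine ⟨by simpa [List.isEmpty_iff] using hc, ?_⟩
        intro c hcmem
        exact hcur c (by simpa using hcmem)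
      · exact hacc x h
  | cons c rest ih =>
    intro cur acc hacc hcur x hx
    by_cases hsp : PySem.Chars.isspace c
    · by_cases hc : cur.isEmpty
      · simp only [PySem.Chars.split₀.go, hsp, hc, if_true] at hx
        exact ih [] acc hacc (by simp) x hx
      · simp only [PySem.Chars.split₀.go, hsp, hc, if_true, if_false] at hx
        refine ih [] (cur.reverse :: acc) ?_ (by simp) x hx
        intro y hy
        rcases List.mem_cons.mp hy with h | h
        · subst h
          refine ⟨by simpa [List.isEmpty_iff] using hc, ?_⟩
          intro d hd
          exact hcur d (by simpa using hd)
        · exact hacc y h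
    · simp only [PySem.Chars.split₀.go, hsp, if_false] at hx
      refine ih (c :: cur) acc hacc ?_ x hx
      intro d hd
      rcases List.mem_cons.mp hd with h | h
      · subst h; exact eq_false_of_ne_true hsp
      · exact hcur d h

theorem pvSplit₀Wordlike (s : String) : ∀ w ∈ PySem.Str.split₀ s, pvWordlike w := by
  intro w hw
  have hmap := PySem.Str.split₀_map_toList s
  have hmem : w.toList ∈ PySem.Chars.split₀ s.toList := by
    rw [← hmap]
    exact List.mem_map_of_mem hw
  have hg := pvGoWordlike s.toList [] [] (by simp) (by simp) w.toList hmem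
  exact ⟨hg.1, hg.2⟩

-- ---------- npfx facts ----------
theorem pvNpfxMem (ws : List String) : ∀ p ∈ pvNpfx ws, p ≠ [] ∧ ∀ w ∈ p, w ∈ ws := by
  induction ws with
  | nil => simp [pvNpfx]
  | cons w ws ih =>
    intro p hp
    rcases List.mem_cons.mp hp with h | h
    · subst h; simp
    · obtain ⟨q, hq, rfl⟩ := List.mem_map.mp h
      refine ⟨by simp, ?_⟩
      intro x hx
      rcases List.mem_cons.mp hx with h' | h'
      · simp [h']
      · exact List.mem_cons_of_mem _ ((ih q hq).2 x h')

theorem pvNpfxNodup (ws : List String) : (pvNpfx ws).Nodup := by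
  induction ws with
  | nil => simp [pvNpfx]
  | cons w ws ih =>
    refine List.Nodup.cons ?_ (List.Nodup.map (fun a b h => by simpa using h) ih)
    intro hmem
    obtain ⟨q, hq, heq⟩ := List.mem_map.mp hmem
    have hqnil : q = [] := by simpa using heq
    exact (pvNpfxMem ws q hq).1 hqnil

theorem pvNpfxLength (ws : List String) : (pvNpfx ws).length = ws.length := by
  induction ws with
  | nil => rfl
  | cons w ws ih => simp [pvNpfx, ih]

theorem pvChainCons (pre : List String) (w : String) (ws : List String) :
    pvChain pre (w :: ws) = (pre ++ [w]) :: pvChain (pre ++ [w]) ws := by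
  simp only [pvChain, pvNpfx, List.map_cons, List.map_map]
  congr 1
  apply List.map_congr_left
  intro p _
  simp

theorem pvChainPrefix (pre : List String) (ws : List String) :
    ∀ p ∈ pvChain pre ws, pre.length < p.length ∧ pre <+: p := by
  intro p hp
  obtain ⟨q, hq, rfl⟩ := List.mem_map.mp hp
  have hne := (pvNpfxMem ws q hq).1
  constructor
  · have : 0 < q.length := List.length_pos_iff.mpr hne
    simp; omega
  · exact List.prefix_append pre q

-- ---------- trie structural lemmas ----------
theorem pvFlatWAppend (t u : PvTrie) (pre : List String) :
    pvFlatW (pvAppendCh t u) pre = pvFlatW t pre ++ pvFlatW u pre := by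
  induction t generalizing pre with
  | nil => simp [pvAppendCh, pvFlatW]
  | cons w c i sub rest ihs ihr => simp [pvAppendCh, pvFlatW, ihr]

theorem pvAppendKeys (t u : PvTrie) : pvKeys (pvAppendCh t u) = pvKeys t ++ pvKeys u := by
  induction t with
  | nil => simp [pvAppendCh, pvKeys]
  | cons w c i sub rest ihs ihr => simp [pvAppendCh, pvKeys, ihr]

theorem pvNewChainSpec (ws : List String) (ctr : Int) (pre : List String) :
    pvFlatW (pvNewChain ws ctr).1 pre
        = (PySem.List.enumerate (pvChain pre ws) ctr).map (fun q => (1, q.1, q.2))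
      ∧ (pvNewChain ws ctr).2 = ctr + ws.length := by
  induction ws generalizing ctr pre with
  | nil => simp [pvNewChain, pvFlatW, pvChain, pvNpfx, PySem.List.enumerate]
  | cons w ws ih =>
    obtain ⟨h1, h2⟩ := ih (ctr + 1) (pre ++ [w])
    constructor
    · simp only [pvNewChain, pvFlatW, pvChainCons, PySem.List.enumerate_cons, List.map_cons]
      rw [h1]
      simp
    · simp only [pvNewChain]
      rw [h2]
      simp
      omega

theorem pvNewChainWF (ws : List String) (ctr : Int) (h : ∀ w ∈ ws, pvWordlike w) :
    pvWF (pvNewChain ws ctr).1 := by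
  induction ws generalizing ctr with
  | nil => simp [pvNewChain, pvWF]
  | cons w ws ih =>
    simp only [pvNewChain, pvWF]
    exact ⟨h w (by simp), by simp [pvKeys], ih (ctr + 1) (fun x hx => h x (by simp [hx])), trivial⟩

theorem pvFlatWShape (t : PvTrie) (pre : List String) :
    ∀ e ∈ pvFlatW t pre, ∃ w ∈ pvKeys t, (pre ++ [w]) <+: e.2.2 := by
  induction t generalizing pre with
  | nil => simp [pvFlatW]
  | cons w c i sub rest ihs ihr =>
    intro e he
    simp only [pvFlatW, List.mem_cons, List.mem_append] at he
    rcases he with h | h | h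
    · subst h
      exact ⟨w, by simp [pvKeys], by simp⟩
    · obtain ⟨w', hw', hpre⟩ := ihs (pre ++ [w]) e h
      refine ⟨w, by simp [pvKeys], List.IsPrefix.trans ?_ hpre⟩
      simpa [List.append_assoc] using List.prefix_append (pre ++ [w]) [w']
    · obtain ⟨w', hw', hpre⟩ := ihr pre e h
      exact ⟨w', by simp [pvKeys, hw'], hpre⟩

theorem pvFindChNone (t : PvTrie) (w : String) : pvFindCh t w = none ↔ w ∉ pvKeys t := by
  induction t with
  | nil => simp [pvFindCh, pvKeys]
  | cons w' c i sub rest ihs ihr =>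
    by_cases h : w' = w
    · subst h; simp [pvFindCh, pvKeys]
    · simp [pvFindCh, pvKeys, h, ihr, Ne.symm h]

-- two one-word extensions of the same pre that prefix the same path agree
theorem pvPrefixHead (pre : List String) (w w' : String) (p : List String)
    (h1 : (pre ++ [w]) <+: p) (h2 : (pre ++ [w']) <+: p) : w = w' := by
  have hlen : (pre ++ [w]).length = (pre ++ [w']).length := by simp
  have h3 : (pre ++ [w]) <+: (pre ++ [w']) :=
    List.prefix_of_prefix_length_le h1 h2 (by omega)
  have heq := List.IsPrefix.eq_of_length h3 hlen
  simpa using heq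

-- decomposition of a trie around a found child, and its replacement
theorem pvFoundDecomp (t : PvTrie) (w : String) (c i : Int) (sub : PvTrie)
    (hf : pvFindCh t w = some (c, i, sub)) (hwf : pvWF t) (pre : List String) :
    pvWF sub ∧ pvWordlike w ∧
    ∃ A1 A2, (∀ c2 i2 (sub2 : PvTrie),
        pvFlatW (pvReplaceCh t w c2 i2 sub2) pre
          = A1 ++ (c2, i2, pre ++ [w]) :: pvFlatW sub2 (pre ++ [w]) ++ A2) ∧
      pvFlatW t pre = A1 ++ (c, i, pre ++ [w]) :: pvFlatW sub (pre ++ [w]) ++ A2 ∧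
      (∀ e ∈ A1 ++ A2, ¬ (pre ++ [w]) <+: (e.2.2 : List String)) := by
  induction t with
  | nil => simp [pvFindCh] at hf
  | cons w' c' i' sub' rest ihs ihr =>
    obtain ⟨hw1, hw2, hw3, hw4⟩ := hwf
    by_cases h : w' = w
    · subst h
      rw [show pvFindCh (PvTrie.cons w' c' i' sub' rest) w' = some (c', i', sub') from by
        simp [pvFindCh]] at hf
      obtain ⟨hc, hi, hsub⟩ : c' = c ∧ i' = i ∧ sub' = sub := by
        have := Option.some.inj hf
        simp only [Prod.mk.injEq] at this
        exact ⟨this.1, this.2.1, this.2.2⟩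
      subst hc; subst hi; subst hsub
      refine ⟨hw3, hw1, [], pvFlatW rest pre, ?_, ?_, ?_⟩
      · intro c2 i2 sub2
        simp [pvReplaceCh, pvFlatW]
      · simp [pvFlatW]
      · intro e he hpre'
        obtain ⟨w'', hw'', hp⟩ := pvFlatWShape rest pre e (by simpa using he)
        have heq := pvPrefixHead pre w' w'' e.2.2 hpre' hp
        rw [← heq] at hw''
        exact hw2 hw''
    · simp only [pvFindCh, if_neg h] at hf
      obtain ⟨hsub, hwl, A1', A2', hrep', hflat', hdisj'⟩ := ihr hf hw4
      refine ⟨hsub, hwl, (c', i', pre ++ [w']) :: pvFlatW sub' (pre ++ [w']) ++ A1', A2', ?_, ?_, ?_⟩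
      · intro c2 i2 sub2
        simp only [pvReplaceCh, if_neg h, pvFlatW, hrep' c2 i2 sub2]
        simp [List.append_assoc]
      · simp only [pvFlatW, hflat']
        simp [List.append_assoc]
      · intro e he hpre'
        simp only [List.cons_append, List.mem_cons, List.append_assoc, List.mem_append] at he
        rcases he with he | he | he | he
        · subst he
          have heq := pvPrefixHead pre w w' (pre ++ [w']) hpre' (by simp)
          exact h heq.symm
        · obtain ⟨w'', hw'', hp⟩ := pvFlatWShape sub' (pre ++ [w']) e he
          have hp' : (pre ++ [w']) <+: e.2.2 := by
            refine List.IsPrefix.trans ?_ hp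
            simpa [List.append_assoc] using List.prefix_append (pre ++ [w']) [w'']
          have heq := pvPrefixHead pre w w' e.2.2 hpre' hp'
          exact h heq.symm
        · exact hdisj' e (by simp [he]) hpre'
        · exact hdisj' e (by simp [he]) hpre' 

theorem pvReplaceKeys (t : PvTrie) (w : String) (c2 i2 : Int) (sub2 : PvTrie) :
    pvKeys (pvReplaceCh t w c2 i2 sub2) = pvKeys t := by
  induction t with
  | nil => rfl
  | cons w' c i sub rest ihs ihr =>
    by_cases h : w' = w <;> simp [pvReplaceCh, pvKeys, h, ihr]

theorem pvReplaceWF (t : PvTrie) (w : String) (c2 i2 : Int) (sub2 : PvTrie)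
    (hwf : pvWF t) (hs : pvWF sub2) : pvWF (pvReplaceCh t w c2 i2 sub2) := by
  induction t with
  | nil => exact trivial
  | cons w' c i sub rest ihs ihr =>
    obtain ⟨h1, h2, h3, h4⟩ := hwf
    by_cases h : w' = w
    · subst h
      simp only [pvReplaceCh, if_pos rfl]
      exact ⟨h1, h2, hs, h4⟩
    · simp only [pvReplaceCh, h, if_false]
      exact ⟨h1, by rwa [pvReplaceKeys], h3, ihr h4⟩

theorem pvAppendWF (t u : PvTrie) (hwf : pvWF t) (hu : pvWF u)
    (hdisj : ∀ x ∈ pvKeys u, x ∉ pvKeys t) : pvWF (pvAppendCh t u) := by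
  induction t with
  | nil => exact hu
  | cons w c i sub rest ihs ihr =>
    obtain ⟨h1, h2, h3, h4⟩ := hwf
    refine ⟨h1, ?_, h3, ihr h4 (fun x hx => fun hmem => hdisj x hx (by simp [pvKeys, hmem]))⟩
    rw [pvAppendKeys]
    intro hmem
    rcases List.mem_append.mp hmem with h | h
    · exact h2 h
    · exact hdisj w h (by simp [pvKeys])

theorem pvChainConsPrefix (pre : List String) (w : String) (ws : List String) :
    ∀ p ∈ pvChain pre (w :: ws), (pre ++ [w]) <+: p := by
  intro p hp
  rw [pvChainCons] at hp
  rcases List.mem_cons.mp hp with h | h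
  · rw [h]
  · exact (pvChainPrefix (pre ++ [w]) ws p h).2

theorem pvPathsWMem (t : PvTrie) (pre : List String) (p : List String)
    (h : p ∈ pvPathsW t pre) : ∃ w ∈ pvKeys t, (pre ++ [w]) <+: p := by
  obtain ⟨e, he, rfl⟩ := List.mem_map.mp h
  exact pvFlatWShape t pre e he

theorem pvBumpCongr (C C' : List (List String)) (e : Int × Int × List String)
    (h : e.2.2 ∈ C ↔ e.2.2 ∈ C') : pvBump C e = pvBump C' e := by
  simp only [pvBump]
  by_cases hm : e.2.2 ∈ C
  · rw [if_pos hm, if_pos (h.mp hm)]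
  · rw [if_neg hm, if_neg (fun h' => hm (h.mpr h'))]

-- ---------- the core insertion lemma ----------
theorem pvInsertSpec (ws : List String) (t : PvTrie) (ctr : Int) (pre : List String)
    (hwf : pvWF t) (hws : ∀ w ∈ ws, pvWordlike w) :
    pvWF (pvInsert ws t ctr).1 ∧
    (pvInsert ws t ctr).2
      = ctr + ((pvChain pre ws).filter (fun p => ¬ p ∈ pvPathsW t pre)).length ∧
    (pvFlatW (pvInsert ws t ctr).1 pre).Perm
      ((pvFlatW t pre).map (pvBump (pvChain pre ws))
        ++ (PySem.List.enumerate ((pvChain pre ws).filter (fun p => ¬ p ∈ pvPathsW t pre)) ctr).map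
            (fun q => (1, q.1, q.2))) := by
  induction ws generalizing t ctr pre with
  | nil =>
    have hC : pvChain pre [] = [] := by simp [pvChain, pvNpfx]
    refine ⟨hwf, by simp [pvInsert, hC], ?_⟩
    have hid : (pvFlatW t pre).map (pvBump (pvChain pre [])) = pvFlatW t pre := by
      calc (pvFlatW t pre).map (pvBump (pvChain pre []))
          = (pvFlatW t pre).map id :=
            List.map_congr_left (fun e _ => by simp [pvBump, hC])
        _ = pvFlatW t pre := List.map_id _
    rw [show pvInsert [] t ctr = (t, ctr) from rfl, hid, hC]
    simp [PySem.List.enumerate]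
  | cons w ws ih =>
    have hw : pvWordlike w := hws w (by simp)
    have hws' : ∀ x ∈ ws, pvWordlike x := fun x hx => hws x (by simp [hx])
    have hCpre := pvChainConsPrefix pre w ws
    cases hfc : pvFindCh t w with
    | some cis =>
      obtain ⟨c, i, sub⟩ := cis
      obtain ⟨hsubwf, hwl, A1, A2, hrep, hflat, hdisj⟩ := pvFoundDecomp t w c i sub hfc hwf pre
      obtain ⟨ihwf, ihctr, ihperm⟩ := ih sub ctr (pre ++ [w]) hsubwf hws'
      have hnodeMem : (pre ++ [w]) ∈ pvPathsW t pre := by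
        unfold pvPathsW
        rw [hflat]
        exact List.mem_map.mpr ⟨(c, i, pre ++ [w]), by simp, rfl⟩
      have hmemiff : ∀ p ∈ pvChain (pre ++ [w]) ws,
          (p ∈ pvPathsW t pre ↔ p ∈ pvPathsW sub (pre ++ [w])) := by
        intro p hp
        obtain ⟨hlen, hpre⟩ := pvChainPrefix (pre ++ [w]) ws p hp
        constructor
        · intro hmem
          unfold pvPathsW at hmem
          rw [hflat] at hmem
          obtain ⟨e, he, hpe⟩ := List.mem_map.mp hmem
          rcases List.mem_append.mp he with h1 | h1
          · rcases List.mem_append.mp h1 with h2 | h2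
            · exact absurd (hpe ▸ hpre.trans (List.prefix_refl _) : (pre ++ [w]) <+: e.2.2)
                (hdisj e (List.mem_append.mpr (Or.inl h2)))
            · rcases List.mem_cons.mp h2 with h3 | h3
              · rw [h3] at hpe
                simp only at hpe
                rw [← hpe] at hlen
                omega
              · exact List.mem_map.mpr ⟨e, h3, hpe⟩
          · exact absurd (hpe ▸ hpre.trans (List.prefix_refl _) : (pre ++ [w]) <+: e.2.2)
              (hdisj e (List.mem_append.mpr (Or.inr h1)))
        · intro hmem
          obtain ⟨e, he, hpe⟩ := List.mem_map.mp hmem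
          unfold pvPathsW
          rw [hflat]
          exact List.mem_map.mpr ⟨e, by simp [he], hpe⟩
      have hfilter : (pvChain pre (w :: ws)).filter (fun p => ¬ p ∈ pvPathsW t pre)
          = (pvChain (pre ++ [w]) ws).filter (fun p => ¬ p ∈ pvPathsW sub (pre ++ [w])) := by
        rw [pvChainCons, List.filter_cons]
        rw [if_neg (by simpa using hnodeMem)]
        exact List.filter_congr (fun p hp => by
          have hiff := hmemiff p hp
          by_cases hm : p ∈ pvPathsW t pre
          · simp [hm, hiff.mp hm]
          · have hns : p ∉ pvPathsW sub (pre ++ [w]) := fun h' => hm (hiff.mpr h')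
            simp [hm, hns])
      have hstep : pvInsert (w :: ws) t ctr
          = (pvReplaceCh t w (c + 1) i (pvInsert ws sub ctr).1, (pvInsert ws sub ctr).2) := by
        simp [pvInsert, hfc]
      have hA1 : A1.map (pvBump (pvChain pre (w :: ws))) = A1 :=
        calc A1.map (pvBump (pvChain pre (w :: ws)))
            = A1.map id := List.map_congr_left (fun e he => by
                simp only [pvBump, id]
                rw [if_neg (fun hm => hdisj e (List.mem_append.mpr (Or.inl he)) (hCpre e.2.2 hm))])
          _ = A1 := List.map_id _
      have hA2 : A2.map (pvBump (pvChain pre (w :: ws))) = A2 :=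
        calc A2.map (pvBump (pvChain pre (w :: ws)))
            = A2.map id := List.map_congr_left (fun e he => by
                simp only [pvBump, id]
                rw [if_neg (fun hm => hdisj e (List.mem_append.mpr (Or.inr he)) (hCpre e.2.2 hm))])
          _ = A2 := List.map_id _
      have hnode : pvBump (pvChain pre (w :: ws)) (c, i, pre ++ [w]) = (c + 1, i, pre ++ [w]) := by
        simp only [pvBump]
        rw [if_pos (by rw [pvChainCons]; simp)]
      have hfsub : (pvFlatW sub (pre ++ [w])).map (pvBump (pvChain pre (w :: ws)))
          = (pvFlatW sub (pre ++ [w])).map (pvBump (pvChain (pre ++ [w]) ws)) :=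
        List.map_congr_left (fun e he => pvBumpCongr _ _ e (by
          obtain ⟨w'', hw'', hp⟩ := pvFlatWShape sub (pre ++ [w]) e he
          have hlen : (pre ++ [w]).length < e.2.2.length := by
            have hle := hp.length_le
            simp only [List.length_append, List.length_singleton] at hle ⊢
            omega
          rw [pvChainCons]
          simp only [List.mem_cons]
          constructor
          · rintro (h | h)
            · rw [← h] at hlen
              omega
            · exact h
          · exact fun h => Or.inr h))
      have hmap : (pvFlatW t pre).map (pvBump (pvChain pre (w :: ws)))
          = A1 ++ (c + 1, i, pre ++ [w]) ::
              (pvFlatW sub (pre ++ [w])).map (pvBump (pvChain (pre ++ [w]) ws)) ++ A2 := by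
        rw [hflat]
        rw [List.map_append, List.map_append, List.map_cons, hA1, hA2, hnode, hfsub]
      refine ⟨?_, ?_, ?_⟩
      · rw [hstep]
        exact pvReplaceWF t w (c + 1) i (pvInsert ws sub ctr).1 hwf ihwf
      · rw [hstep]
        show (pvInsert ws sub ctr).2 = _
        rw [hfilter]
        exact ihctr
      · rw [hstep]
        show (pvFlatW (pvReplaceCh t w (c + 1) i (pvInsert ws sub ctr).1) pre).Perm _
        rw [hrep (c + 1) i (pvInsert ws sub ctr).1, hmap, hfilter]
        simp only [List.cons_append, List.append_assoc]
        refine List.Perm.append_left A1 (List.Perm.cons _ ?_)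
        refine (ihperm.append_right A2).trans ?_
        rw [List.append_assoc]
        exact List.Perm.append_left _ List.perm_append_comm
    | none =>
      have hkey : w ∉ pvKeys t := (pvFindChNone t w).mp hfc
      obtain ⟨hnc1, hnc2⟩ := pvNewChainSpec ws (ctr + 1) (pre ++ [w])
      have hncwf := pvNewChainWF ws (ctr + 1) hws'
      have hstep : pvInsert (w :: ws) t ctr
          = (pvAppendCh t (PvTrie.cons w 1 ctr (pvNewChain ws (ctr + 1)).1 PvTrie.nil),
             (pvNewChain ws (ctr + 1)).2) := by
        simp [pvInsert, hfc]
      have hnotpaths : ∀ p ∈ pvChain pre (w :: ws), p ∉ pvPathsW t pre := by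
        intro p hp hmem
        obtain ⟨w'', hw'', hp''⟩ := pvPathsWMem t pre p hmem
        have heq := pvPrefixHead pre w w'' p (hCpre p hp) hp''
        rw [← heq] at hw''
        exact hkey hw''
      have hfilter : (pvChain pre (w :: ws)).filter (fun p => ¬ p ∈ pvPathsW t pre)
          = pvChain pre (w :: ws) :=
        List.filter_eq_self.mpr (fun p hp => by simpa using hnotpaths p hp)
      have hid : (pvFlatW t pre).map (pvBump (pvChain pre (w :: ws))) = pvFlatW t pre :=
        calc (pvFlatW t pre).map (pvBump (pvChain pre (w :: ws)))
            = (pvFlatW t pre).map id := List.map_congr_left (fun e he => by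
                simp only [pvBump, id]
                rw [if_neg (fun hm => hnotpaths e.2.2 hm (List.mem_map_of_mem he))])
          _ = pvFlatW t pre := List.map_id _
      have hu : pvFlatW (PvTrie.cons w 1 ctr (pvNewChain ws (ctr + 1)).1 PvTrie.nil) pre
          = (PySem.List.enumerate (pvChain pre (w :: ws)) ctr).map (fun q => (1, q.1, q.2)) := by
        rw [pvChainCons, PySem.List.enumerate_cons, List.map_cons]
        simp only [pvFlatW, hnc1]
        simp
      refine ⟨?_, ?_, ?_⟩
      · rw [hstep]
        refine pvAppendWF t _ hwf ⟨hw, by simp [pvKeys], hncwf, trivial⟩ ?_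
        intro x hx
        have hxw : x = w := by simpa [pvKeys] using hx
        rw [hxw]
        exact hkey
      · rw [hstep, hfilter]
        show (pvNewChain ws (ctr + 1)).2 = _
        rw [hnc2]
        have hlen : (pvChain pre (w :: ws)).length = ws.length + 1 := by
          simp [pvChain, pvNpfxLength, pvNpfx]
        rw [hlen]
        push_cast
        omega
      · rw [hstep, hfilter]
        show (pvFlatW (pvAppendCh t (PvTrie.cons w 1 ctr (pvNewChain ws (ctr + 1)).1 PvTrie.nil)) pre).Perm _
        rw [pvFlatWAppend, hid, hu]

-- ---------- dedup / count / enumerate transport ----------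
theorem pvDedupAppendNodup (A B : List (List String)) (hB : B.Nodup) :
    PySem.List.dedup (A ++ B) = PySem.List.dedup A ++ B.filter (fun x => ¬ x ∈ A) := by
  have hsing : ∀ (l : List (List String)) (a : List String), PySem.List.dedup (l ++ [a])
      = if a ∈ PySem.List.dedup l then PySem.List.dedup l else PySem.List.dedup l ++ [a] := by
    intro l a
    simp only [PySem.List.dedup_eq_ofList, PySem.Set.ofList_eq_foldl, List.foldl_append,
      List.foldl_cons, List.foldl_nil]
    simp [PySem.Set.add, PySem.Set.contains]
  induction B using List.reverseRecOn with
  | nil => simp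
  | append_singleton B b ih =>
    have hB' : B.Nodup ∧ b ∉ B := by
      constructor
      · exact hB.of_append_left
      · intro hmem
        have := List.disjoint_of_nodup_append hB
        exact this hmem (by simp)
    rw [← List.append_assoc, hsing]
    have hmemiff : b ∈ PySem.List.dedup (A ++ B) ↔ b ∈ A := by
      rw [PySem.List.dedup_eq_ofList, PySem.Set.mem_ofList, List.mem_append]
      constructor
      · rintro (h | h)
        · exact h
        · exact absurd h hB'.2
      · exact Or.inl
    by_cases hbA : b ∈ A
    · rw [if_pos (hmemiff.mpr hbA), ih hB'.1, List.filter_append]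
      simp [hbA]
    · rw [if_neg (fun h => hbA (hmemiff.mp h)), ih hB'.1, List.filter_append]
      simp [hbA, List.append_assoc]

theorem pvEnumerateMap {α β : Type} (f : α → β) (l : List α) (s : Int) :
    PySem.List.enumerate (l.map f) s = (PySem.List.enumerate l s).map (fun q => (q.1, f q.2)) := by
  induction l generalizing s with
  | nil => simp [PySem.List.enumerate]
  | cons x xs ih => simp [PySem.List.enumerate_cons, ih]

theorem pvDedupMapInj (f : List String → String) (l : List (List String))
    (hinj : ∀ x ∈ l, ∀ y ∈ l, f x = f y → x = y) :
    PySem.List.dedup (l.map f) = (PySem.List.dedup l).map f := by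
  induction l using List.reverseRecOn with
  | nil => simp
  | append_singleton l a ih =>
    have hsingS : ∀ (l' : List String) (x : String), PySem.List.dedup (l' ++ [x])
        = if x ∈ PySem.List.dedup l' then PySem.List.dedup l' else PySem.List.dedup l' ++ [x] := by
      intro l' x
      simp only [PySem.List.dedup_eq_ofList, PySem.Set.ofList_eq_foldl, List.foldl_append,
        List.foldl_cons, List.foldl_nil]
      simp [PySem.Set.add, PySem.Set.contains]
    have hsingW : ∀ (l' : List (List String)) (x : List String), PySem.List.dedup (l' ++ [x])
        = if x ∈ PySem.List.dedup l' then PySem.List.dedup l' else PySem.List.dedup l' ++ [x] := by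
      intro l' x
      simp only [PySem.List.dedup_eq_ofList, PySem.Set.ofList_eq_foldl, List.foldl_append,
        List.foldl_cons, List.foldl_nil]
      simp [PySem.Set.add, PySem.Set.contains]
    have ih' := ih (fun x hx y hy => hinj x (by simp [hx]) y (by simp [hy]))
    rw [List.map_append, List.map_singleton, hsingS, hsingW, ih']
    have hmemiff : f a ∈ (PySem.List.dedup l).map f ↔ a ∈ PySem.List.dedup l := by
      constructor
      · intro h
        obtain ⟨x, hx, hfx⟩ := List.mem_map.mp h
        have hxl : x ∈ l := by
          rw [PySem.List.dedup_eq_ofList, PySem.Set.mem_ofList] at hx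
          exact hx
        have := hinj x (by simp [hxl]) a (by simp) hfx
        rwa [← this]
      · intro h
        exact List.mem_map_of_mem h
    by_cases hmem : a ∈ PySem.List.dedup l
    · rw [if_pos (hmemiff.mpr hmem), if_pos hmem]
    · rw [if_neg (fun h => hmem (hmemiff.mp h)), if_neg hmem, List.map_append, List.map_singleton]

theorem pvCountMapInj (f : List String → String) (l : List (List String))
    (p : List String) (hinj : ∀ x ∈ l, f x = f p → x = p) :
    (l.map f).count (f p) = l.count p := by
  induction l with
  | nil => simp
  | cons x xs ih =>
    have ih' := ih (fun y hy => hinj y (by simp [hy]))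
    simp only [List.map_cons, List.count_cons, ih']
    congr 1
    by_cases h : x = p
    · subst h; simp
    · have : ¬ f x = f p := fun hf => h (hinj x (by simp) hf)
      simp [h, this]

-- ---------- the build invariant ----------
theorem pvBuildInv (wn : List String) :
    pvWF (wn.foldl (fun (st : PvTrie × Int) name =>
        pvInsert (PySem.Str.split₀ name) st.1 st.2) (PvTrie.nil, 0)).1
    ∧ (wn.foldl (fun (st : PvTrie × Int) name =>
        pvInsert (PySem.Str.split₀ name) st.1 st.2) (PvTrie.nil, 0)).2
        = ((PySem.List.dedup (pvT wn)).length : Int)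
    ∧ (pvFlatW (wn.foldl (fun (st : PvTrie × Int) name =>
        pvInsert (PySem.Str.split₀ name) st.1 st.2) (PvTrie.nil, 0)).1 []).Perm
        (pvAnnot (pvT wn)) := by
  induction wn using List.reverseRecOn with
  | nil =>
    refine ⟨trivial, ?_, ?_⟩
    · simp [pvT, PySem.List.dedup_eq_ofList, PySem.Set.ofList_eq_foldl]
    · simp [pvT, pvAnnot, pvFlatW, PySem.List.dedup_eq_ofList, PySem.Set.ofList_eq_foldl,
        PySem.List.enumerate]
  | append_singleton wn n ih =>
    obtain ⟨hwf, hctr, hperm⟩ := ih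
    simp only [List.foldl_append, List.foldl_cons, List.foldl_nil]
    obtain ⟨iwf, ictr, iperm⟩ := pvInsertSpec (PySem.Str.split₀ n)
      (wn.foldl (fun (st : PvTrie × Int) name =>
        pvInsert (PySem.Str.split₀ name) st.1 st.2) (PvTrie.nil, 0)).1
      (wn.foldl (fun (st : PvTrie × Int) name =>
        pvInsert (PySem.Str.split₀ name) st.1 st.2) (PvTrie.nil, 0)).2
      [] hwf (pvSplit₀Wordlike n)
    refine ⟨iwf, ?_, ?_⟩
    all_goals {
      have hms : (pvPathsW (wn.foldl (fun (st : PvTrie × Int) name =>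
          pvInsert (PySem.Str.split₀ name) st.1 st.2) (PvTrie.nil, 0)).1 []).Perm
          (PySem.List.dedup (pvT wn)) := by
        unfold pvPathsW
        refine (hperm.map (fun e => e.2.2)).trans ?_
        simp only [pvAnnot, List.map_map]
        have hfun : ((fun (e : Int × Int × List String) => e.2.2) ∘
            (fun (q : Int × List String) => ((↑((pvT wn).count q.2) : Int), q.1, q.2)))
            = (fun (q : Int × List String) => q.2) := rfl
        rw [hfun, PySem.List.map_snd_enumerate]
      have hmem : ∀ p : List String, p ∈ pvPathsW (wn.foldl (fun (st : PvTrie × Int) name =>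
          pvInsert (PySem.Str.split₀ name) st.1 st.2) (PvTrie.nil, 0)).1 [] ↔ p ∈ pvT wn := by
        intro p
        rw [hms.mem_iff, PySem.List.dedup_eq_ofList, PySem.Set.mem_ofList]
      have hfilt : (pvChain [] (PySem.Str.split₀ n)).filter
          (fun p => ¬ p ∈ pvPathsW (wn.foldl (fun (st : PvTrie × Int) name =>
            pvInsert (PySem.Str.split₀ name) st.1 st.2) (PvTrie.nil, 0)).1 [])
          = (pvChain [] (PySem.Str.split₀ n)).filter (fun p => ¬ p ∈ pvT wn) :=
        List.filter_congr (fun p _ => decide_eq_decide.mpr (not_congr (hmem p)))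
      have hCnodup : (pvChain [] (PySem.Str.split₀ n)).Nodup := by
        unfold pvChain
        exact List.Nodup.map (fun a b h => by simpa using h) (pvNpfxNodup _)
      have hT' : pvT (wn ++ [n]) = pvT wn ++ pvChain [] (PySem.Str.split₀ n) := by
        simp [pvT, pvChain, List.flatMap_append]
      have hded : PySem.List.dedup (pvT (wn ++ [n]))
          = PySem.List.dedup (pvT wn)
            ++ (pvChain [] (PySem.Str.split₀ n)).filter (fun p => ¬ p ∈ pvT wn) := by
        rw [hT']
        exact pvDedupAppendNodup _ _ hCnodup
      first
      | -- counter equation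
        (rw [ictr, hfilt, hded, hctr]
         simp [List.length_append])
      | -- permutation
        (refine iperm.trans ?_
         rw [hfilt, hctr]
         refine ((hperm.map (pvBump (pvChain [] (PySem.Str.split₀ n)))).append_right _).trans ?_
         have hgoal : (pvAnnot (pvT wn)).map (pvBump (pvChain [] (PySem.Str.split₀ n)))
              ++ (PySem.List.enumerate ((pvChain [] (PySem.Str.split₀ n)).filter
                  (fun p => ¬ p ∈ pvT wn)) ((PySem.List.dedup (pvT wn)).length : Int)).map
                  (fun q => (1, q.1, q.2))
              = pvAnnot (pvT (wn ++ [n])) := by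
           unfold pvAnnot
           rw [hded, PySem.List.enumerate_append, List.map_append]
           congr 1
           · rw [List.map_map]
             refine List.map_congr_left ?_
             intro q hq
             obtain ⟨k, hk, hqe⟩ := (PySem.List.mem_enumerate_iff _ _ _).mp hq
             have hq2 : q.2 ∈ PySem.List.dedup (pvT wn) := by
               rw [hqe]; exact List.getElem_mem hk
             have hq2T : q.2 ∈ pvT wn := by
               rw [PySem.List.dedup_eq_ofList, PySem.Set.mem_ofList] at hq2
               exact hq2
             simp only [Function.comp, pvBump]
             rw [hT', List.count_append]
             by_cases hc : q.2 ∈ pvChain [] (PySem.Str.split₀ n)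
             · rw [if_pos hc, List.count_eq_one_of_mem hCnodup hc]
               push_cast
               rfl
             · rw [if_neg hc, List.count_eq_zero_of_not_mem hc]
               simp
           · have hzero : (0 : Int) + ((PySem.List.dedup (pvT wn)).length : Int)
                 = ((PySem.List.dedup (pvT wn)).length : Int) := by ring
             rw [hzero]
             refine List.map_congr_left ?_
             intro q hq
             obtain ⟨k, hk, hqe⟩ := (PySem.List.mem_enumerate_iff _ _ _).mp hq
             have hq2 : q.2 ∈ (pvChain [] (PySem.Str.split₀ n)).filter (fun p => ¬ p ∈ pvT wn) := by
               rw [hqe]; exact List.getElem_mem hk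
             obtain ⟨hqC, hqT⟩ := List.mem_filter.mp hq2
             have hqT' : q.2 ∉ pvT wn := by simpa using hqT
             rw [hT', List.count_append, List.count_eq_zero_of_not_mem hqT',
               List.count_eq_one_of_mem hCnodup hqC]
             simp
         rw [hgoal])
    }

theorem pvJoinAllToListPrefix : ∀ (us : List String) (u : String),
    ∃ r, (pvJoinAll (u :: us)).toList = u.toList ++ r := by
  intro us
  induction us with
  | nil => exact fun u => ⟨[], by simp [pvJoinAll]⟩
  | cons v vs ih =>
    intro u
    have hstep : pvJoinAll (u :: v :: vs) = pvJoinAll ((u ++ " " ++ v) :: vs) := by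
      simp [pvJoinAll]
    obtain ⟨r, hr⟩ := ih (u ++ " " ++ v)
    refine ⟨" ".toList ++ v.toList ++ r, ?_⟩
    rw [hstep, hr]
    simp [String.toList_append, List.append_assoc]

theorem pvJoinAllNe (us : List String) (u : String) (hu : pvWordlike u) :
    pvJoinAll (u :: us) ≠ "" := by
  obtain ⟨r, hr⟩ := pvJoinAllToListPrefix us u
  intro h
  rw [h] at hr
  exact hu.1 (by cases hu' : u.toList with
    | nil => rfl
    | cons c cs => rw [hu'] at hr; simp at hr)

-- ---------- string-level flatten bridge ----------
theorem pvFlatBridge (t : PvTrie) (preW : List String) (hwf : pvWF t)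
    (hpre : ∀ w ∈ preW, pvWordlike w) :
    pvFlat t (pvJoinAll preW) = (pvFlatW t preW).map (fun e => (e.1, e.2.1, pvJoinAll e.2.2)) := by
  induction t generalizing preW with
  | nil => simp [pvFlat, pvFlatW]
  | cons w c i sub rest ihs ihr =>
    obtain ⟨h1, h2, h3, h4⟩ := hwf
    have hp : (if pvJoinAll preW = "" then w else pvJoinAll preW ++ " " ++ w)
        = pvJoinAll (preW ++ [w]) := by
      cases preW with
      | nil => simp [pvJoinAll]
      | cons u us =>
        rw [if_neg (pvJoinAllNe us u (hpre u (by simp)))]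
        exact (pvJoinAllAppend us u w).symm
    have hpre' : ∀ x ∈ preW ++ [w], pvWordlike x := by
      intro x hx
      rcases List.mem_append.mp hx with h | h
      · exact hpre x h
      · rw [List.mem_singleton.mp h]; exact h1
    simp only [pvFlat, pvFlatW, List.map_cons, List.map_append]
    rw [hp, ihs (preW ++ [w]) h3 hpre', ihr preW h4 hpre]

theorem pvSpaceFreeCancel : ∀ (a b r r' : List Char),
    (∀ c ∈ a, PySem.Chars.isspace c = false) → (∀ c ∈ b, PySem.Chars.isspace c = false) →
    a ++ ' ' :: r = b ++ ' ' :: r' → a = b ∧ r = r' := by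
  intro a
  induction a with
  | nil =>
    intro b r r' _ hb h
    cases b with
    | nil => simpa using h
    | cons d b' =>
      simp only [List.nil_append, List.cons_append, List.cons.injEq] at h
      have : PySem.Chars.isspace d = false := hb d (by simp)
      rw [← h.1] at this
      exact absurd this (by decide)
  | cons c a' ih =>
    intro b r r' ha hb h
    cases b with
    | nil =>
      simp only [List.nil_append, List.cons_append, List.cons.injEq] at h
      have : PySem.Chars.isspace c = false := ha c (by simp)
      rw [h.1] at this
      exact absurd this (by decide)
    | cons d b' =>
      simp only [List.cons_append, List.cons.injEq] at h
      obtain ⟨h1, h2⟩ := h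
      obtain ⟨h3, h4⟩ := ih b' r r' (fun x hx => ha x (by simp [hx])) (fun x hx => hb x (by simp [hx])) h2
      exact ⟨by rw [h1, h3], h4⟩

theorem pvCharsJoinInj : ∀ (a b : List (List Char)),
    (∀ x ∈ a, x ≠ [] ∧ ∀ c ∈ x, PySem.Chars.isspace c = false) →
    (∀ x ∈ b, x ≠ [] ∧ ∀ c ∈ x, PySem.Chars.isspace c = false) →
    PySem.Chars.join [' '] a = PySem.Chars.join [' '] b → a = b := by
  intro a
  induction a with
  | nil =>
    intro b _ hb h
    cases b with
    | nil => rfl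
    | cons y ys =>
      exfalso
      cases ys with
      | nil =>
        simp only [PySem.Chars.join, List.intercalate] at h
        simp at h
        exact (hb y (by simp)).1 h
      | cons v vs =>
        rw [PySem.Chars.join_cons_cons] at h
        have : PySem.Chars.join [' '] [] = ([] : List Char) := by
          simp [PySem.Chars.join, List.intercalate]
        rw [this] at h
        have hlen := congrArg List.length h
        simp only [List.length_append, List.length_cons, List.length_nil] at hlen
        omega
  | cons x xs ih =>
    intro b ha hb h
    cases b with
    | nil =>
      exfalso
      cases xs with
      | nil =>
        simp only [PySem.Chars.join, List.intercalate] at h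
        simp at h
        exact (ha x (by simp)).1 h
      | cons u us =>
        rw [PySem.Chars.join_cons_cons] at h
        have hnil : PySem.Chars.join [' '] [] = ([] : List Char) := by
          simp [PySem.Chars.join, List.intercalate]
        rw [hnil] at h
        have hlen := congrArg List.length h
        simp only [List.length_append, List.length_cons, List.length_nil] at hlen
        omega
    | cons y ys =>
      cases xs with
      | nil =>
        cases ys with
        | nil =>
          simp only [PySem.Chars.join, List.intercalate] at h
          simp at h
          rw [h]
        | cons v vs =>
          exfalso
          rw [PySem.Chars.join_cons_cons] at h
          have hjx : PySem.Chars.join [' '] [x] = x := by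
            simp [PySem.Chars.join, List.intercalate]
          rw [hjx] at h
          have hsp : (' ' : Char) ∈ x := by
            rw [h]
            simp
          exact absurd ((ha x (by simp)).2 ' ' hsp) (by decide)
      | cons u us =>
        cases ys with
        | nil =>
          exfalso
          rw [PySem.Chars.join_cons_cons] at h
          have hjy : PySem.Chars.join [' '] [y] = y := by
            simp [PySem.Chars.join, List.intercalate]
          rw [hjy] at h
          have hsp : (' ' : Char) ∈ y := by
            rw [← h]
            simp
          exact absurd ((hb y (by simp)).2 ' ' hsp) (by decide)
        | cons v vs =>
          rw [PySem.Chars.join_cons_cons, PySem.Chars.join_cons_cons] at h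
          have h' : x ++ ' ' :: PySem.Chars.join [' '] (u :: us)
              = y ++ ' ' :: PySem.Chars.join [' '] (v :: vs) := by
            simpa [List.append_assoc] using h
          obtain ⟨h1, h2⟩ := pvSpaceFreeCancel x y _ _
            ((ha x (by simp)).2) ((hb y (by simp)).2) h'
          have h3 := ih (v :: vs) (fun z hz => ha z (by simp [hz])) (fun z hz => hb z (by simp [hz])) h2
          rw [h1, h3]

-- ---------- join injectivity on wordlike lists ----------
theorem pvJoinInj (p q : List String) (hp : ∀ w ∈ p, pvWordlike w) (hq : ∀ w ∈ q, pvWordlike w)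
    (h : pvJoinAll p = pvJoinAll q) : p = q := by
  have hj : ∀ (l : List String), (pvJoinAll l).toList
      = PySem.Chars.join [' '] (l.map String.toList) := by
    intro l
    rw [← pvJoinWEq]
    unfold pvJoinW
    rw [PySem.Str.toList_join]
    rfl
  have hch : PySem.Chars.join [' '] (p.map String.toList)
      = PySem.Chars.join [' '] (q.map String.toList) := by
    rw [← hj, ← hj, h]
  have hmap := pvCharsJoinInj (p.map String.toList) (q.map String.toList)
    (by
      intro x hx
      obtain ⟨w, hw, rfl⟩ := List.mem_map.mp hx
      exact ⟨(hp w hw).1, (hp w hw).2⟩)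
    (by
      intro x hx
      obtain ⟨w, hw, rfl⟩ := List.mem_map.mp hx
      exact ⟨(hq w hw).1, (hq w hw).2⟩)
    hch
  exact List.map_injective_iff.mpr (fun a b hab => String.toList_inj.mp hab) hmap

-- ---------- keep-first scan: characterization and permutation invariance ----------
theorem pvB3Drop (cb ct cg ib it ig lb lt lg : Int)
    (h1 : cb < ct ∨ (cb = ct ∧ (lb < lt ∨ (lb = lt ∧ it < ib))))
    (h2 : ¬ (cg < ct ∨ (cg = ct ∧ (lg < lt ∨ (lg = lt ∧ it < ig))))) :
    ¬ (cg < cb ∨ (cg = cb ∧ (lg < lb ∨ (lg = lb ∧ ib < ig)))) := by omega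

theorem pvB3Keep (cb ct cg ib it ig lb lt lg : Int)
    (h1 : ¬ (cb < ct ∨ (cb = ct ∧ (lb < lt ∨ (lb = lt ∧ it < ib)))))
    (h2 : ¬ (cg < cb ∨ (cg = cb ∧ (lg < lb ∨ (lg = lb ∧ ib < ig))))) :
    ¬ (cg < ct ∨ (cg = ct ∧ (lg < lt ∨ (lg = lt ∧ it < ig)))) := by omega

theorem pvB3Anti (c1 c2 i1 i2 l1 l2 : Int)
    (h1 : ¬ (c1 < c2 ∨ (c1 = c2 ∧ (l1 < l2 ∨ (l1 = l2 ∧ i2 < i1)))))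
    (h2 : ¬ (c2 < c1 ∨ (c2 = c1 ∧ (l2 < l1 ∨ (l2 = l1 ∧ i1 < i2))))) : i1 = i2 := by omega

theorem pvSelSome (L : List (Int × Int × String)) : ∀ (b : Int × Int × String),
    ∃ g, L.foldl (fun b t =>
      match b with
      | none => some t
      | some q =>
        if q.1 < t.1 ∨ (q.1 = t.1 ∧ (PySem.Str.len q.2.2 < PySem.Str.len t.2.2 ∨
            (PySem.Str.len q.2.2 = PySem.Str.len t.2.2 ∧ t.2.1 < q.2.1)))
        then some t else some q) (some b) = some g := by
  induction L with
  | nil => intro b; exact ⟨b, rfl⟩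
  | cons t L ih =>
    intro b
    simp only [List.foldl_cons]
    split_ifs with hc
    · exact ih t
    · exact ih b

theorem pvSelSpec (L : List (Int × Int × String)) (b g : Int × Int × String)
    (h : L.foldl (fun b t =>
      match b with
      | none => some t
      | some q =>
        if q.1 < t.1 ∨ (q.1 = t.1 ∧ (PySem.Str.len q.2.2 < PySem.Str.len t.2.2 ∨
            (PySem.Str.len q.2.2 = PySem.Str.len t.2.2 ∧ t.2.1 < q.2.1)))
        then some t else some q) (some b) = some g) :
    (g = b ∨ g ∈ L) ∧
    (¬ (g.1 < b.1 ∨ (g.1 = b.1 ∧ (PySem.Str.len g.2.2 < PySem.Str.len b.2.2 ∨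
        (PySem.Str.len g.2.2 = PySem.Str.len b.2.2 ∧ b.2.1 < g.2.1))))) ∧
    ∀ t ∈ L, ¬ (g.1 < t.1 ∨ (g.1 = t.1 ∧ (PySem.Str.len g.2.2 < PySem.Str.len t.2.2 ∨
        (PySem.Str.len g.2.2 = PySem.Str.len t.2.2 ∧ t.2.1 < g.2.1)))) := by
  induction L generalizing b with
  | nil =>
    simp only [List.foldl_nil, Option.some.injEq] at h
    subst h
    refine ⟨Or.inl rfl, ?_, by simp⟩
    omega
  | cons t L ih =>
    simp only [List.foldl_cons] at h
    split_ifs at h with hc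
    · obtain ⟨hmem, hgt, hall⟩ := ih t h
      refine ⟨?_, ?_, ?_⟩
      · rcases hmem with h' | h'
        · exact Or.inr (by simp [h'])
        · exact Or.inr (by simp [h'])
      · exact pvB3Drop b.1 t.1 g.1 b.2.1 t.2.1 g.2.1
          (PySem.Str.len b.2.2) (PySem.Str.len t.2.2) (PySem.Str.len g.2.2) hc hgt
      · intro t' ht'
        rcases List.mem_cons.mp ht' with h' | h'
        · subst h'; exact hgt
        · exact hall t' h'
    · obtain ⟨hmem, hgb, hall⟩ := ih b h
      refine ⟨?_, hgb, ?_⟩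
      · rcases hmem with h' | h'
        · exact Or.inl h'
        · exact Or.inr (by simp [h'])
      · intro t' ht'
        rcases List.mem_cons.mp ht' with h' | h'
        · subst h'
          exact pvB3Keep b.1 t'.1 g.1 b.2.1 t'.2.1 g.2.1
            (PySem.Str.len b.2.2) (PySem.Str.len t'.2.2) (PySem.Str.len g.2.2) hc hgb
        · exact hall t' h' 

theorem pvSelPerm (L1 L2 : List (Int × Int × String)) (hperm : L1.Perm L2)
    (hinj : ∀ e ∈ L1, ∀ e' ∈ L1, e.2.1 = e'.2.1 → e = e') :
    pvSel L1 = pvSel L2 := by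
  cases L1 with
  | nil =>
    have h2 : L2 = [] := hperm.symm.eq_nil
    subst h2; rfl
  | cons t1 L1' =>
    cases L2 with
    | nil => exact absurd hperm.eq_nil (by simp)
    | cons t2 L2' =>
      obtain ⟨g1, hg1⟩ := pvSelSome L1' t1
      obtain ⟨g2, hg2⟩ := pvSelSome L2' t2
      obtain ⟨hm1, hb1, ha1⟩ := pvSelSpec L1' t1 g1 hg1
      obtain ⟨hm2, hb2, ha2⟩ := pvSelSpec L2' t2 g2 hg2
      have hmem1 : g1 ∈ t1 :: L1' := by
        rcases hm1 with h | h
        · simp [h]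
        · simp [h]
      have hmem2 : g2 ∈ t1 :: L1' := by
        have : g2 ∈ t2 :: L2' := by
          rcases hm2 with h | h
          · simp [h]
          · simp [h]
        exact hperm.symm.subset this
      have hall1 : ∀ t ∈ t1 :: L1', ¬ (g1.1 < t.1 ∨ (g1.1 = t.1 ∧ (PySem.Str.len g1.2.2 < PySem.Str.len t.2.2 ∨
          (PySem.Str.len g1.2.2 = PySem.Str.len t.2.2 ∧ t.2.1 < g1.2.1)))) := by
        intro t ht
        rcases List.mem_cons.mp ht with h | h
        · rw [h]; exact hb1
        · exact ha1 t h
      have hball2 : ∀ t ∈ t2 :: L2', ¬ (g2.1 < t.1 ∨ (g2.1 = t.1 ∧ (PySem.Str.len g2.2.2 < PySem.Str.len t.2.2 ∨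
          (PySem.Str.len g2.2.2 = PySem.Str.len t.2.2 ∧ t.2.1 < g2.2.1)))) := by
        intro t ht
        rcases List.mem_cons.mp ht with h | h
        · rw [h]; exact hb2
        · exact ha2 t h
      have hall2 : ∀ t ∈ t1 :: L1', ¬ (g2.1 < t.1 ∨ (g2.1 = t.1 ∧ (PySem.Str.len g2.2.2 < PySem.Str.len t.2.2 ∨
          (PySem.Str.len g2.2.2 = PySem.Str.len t.2.2 ∧ t.2.1 < g2.2.1)))) :=
        fun t ht => hball2 t (hperm.subset ht)
      have hidx : g1.2.1 = g2.2.1 :=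
        pvB3Anti g1.1 g2.1 g1.2.1 g2.2.1 (PySem.Str.len g1.2.2) (PySem.Str.len g2.2.2)
          (hall1 g2 hmem2) (hall2 g1 hmem1)
      have : g1 = g2 := hinj g1 hmem1 g2 hmem2 hidx
      simp only [pvSel, List.foldl_cons]
      rw [hg1, hg2, this]

-- ---------- linking the two scans ----------
theorem pvLinkScan (l : List (String × Int)) (s : Int) (b : Option (Int × Int × String))
    (hb : ∀ q, b = some q → q.2.1 < s) :
    Option.map (fun (t : Int × Int × String) => (t.2.2, t.1))
      (((PySem.List.enumerate l s).map (fun q => (q.2.2, q.1, q.2.1))).foldl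
        (fun b t =>
          match b with
          | none => some t
          | some q =>
            if q.1 < t.1 ∨ (q.1 = t.1 ∧ (PySem.Str.len q.2.2 < PySem.Str.len t.2.2 ∨
                (PySem.Str.len q.2.2 = PySem.Str.len t.2.2 ∧ t.2.1 < q.2.1)))
            then some t else some q) b)
      = l.foldl (fun b p =>
          match b with
          | none => some p
          | some q =>
            if q.2 < p.2 ∨ (q.2 = p.2 ∧ PySem.Str.len q.1 < PySem.Str.len p.1) then some p else some q)
          (Option.map (fun (t : Int × Int × String) => (t.2.2, t.1)) b) := by
  induction l generalizing s b with
  | nil =>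
    cases b with
    | none => rfl
    | some q => rfl
  | cons p l ih =>
    obtain ⟨p1, p2⟩ := p
    simp only [PySem.List.enumerate_cons, List.map_cons, List.foldl_cons]
    cases b with
    | none =>
      exact ih (s + 1) (some (p2, s, p1)) (by intro q hq; cases hq; simp)
    | some q =>
      have hq := hb q rfl
      simp only [Option.map_some]
      split_ifs with h1 h2 h2
      · exact ih (s + 1) (some (p2, s, p1)) (by intro q' hq'; cases hq'; simp)
      · exact absurd (by omega : q.1 < p2 ∨ (q.1 = p2 ∧ PySem.Str.len q.2.2 < PySem.Str.len p1)) h2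
      · exact absurd (by omega : q.1 < p2 ∨ (q.1 = p2 ∧ (PySem.Str.len q.2.2 < PySem.Str.len p1 ∨
          (PySem.Str.len q.2.2 = PySem.Str.len p1 ∧ s < q.2.1)))) h1
      · exact ih (s + 1) (some q) (by intro q' hq'; cases hq'; omega)

theorem pvPairwiseInj {α : Type} (f : α → Int) (L : List α)
    (hp : L.Pairwise (fun a b => f a < f b)) :
    ∀ e ∈ L, ∀ e' ∈ L, f e = f e' → e = e' := by
  induction L with
  | nil => simp
  | cons x L ih =>
    obtain ⟨hx, hL⟩ := List.pairwise_cons.mp hp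
    intro e he e' he' hfe
    rcases List.mem_cons.mp he with h1 | h1 <;> rcases List.mem_cons.mp he' with h2 | h2
    · rw [h1, h2]
    · exfalso
      have := hx e' h2
      rw [h1] at hfe
      omega
    · exfalso
      have := hx e h1
      rw [h2] at hfe
      omega
    · exact ih hL e h1 e' h2 hfe

-- ===== VERDICT (by name: the statement is the Claim_ definition above) =====
theorem find_most_common_substring_spec : Claim_equal_find_most_common_substring := by
  intro wn _
  unfold Spec_find_most_common_substring
  unfold find_most_common_substring find_most_common_substring_alt
  simp only [PySem.List.foldl_append_eq_flatMap, List.nil_append]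
  rw [show (fun name => (PySem.List.pyRange 1 (((PySem.Str.split₀ name).length : Int) + 1) 1).map
        (fun i => PySem.Str.join " " (PySem.List.slice (PySem.Str.split₀ name) none (some i))))
      = (fun name => pvPrefixList (PySem.Str.split₀ name)) from funext (fun n => pvAPref _)]
  rw [pvSelectEq]
  have hlink := pvLinkScan (PySem.Dict.counter
      (wn.flatMap (fun name => pvPrefixList (PySem.Str.split₀ name)))).items 0 none
    (by intro q hq; cases hq)
  simp only [Option.map_none] at hlink
  rw [← hlink]
  have hLA : ((PySem.List.enumerate (PySem.Dict.counter
        (wn.flatMap (fun name => pvPrefixList (PySem.Str.split₀ name)))).items 0).map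
        (fun q => (q.2.2, q.1, q.2.1)))
      = (PySem.List.enumerate (PySem.List.dedup
          (wn.flatMap (fun name => pvPrefixList (PySem.Str.split₀ name)))) 0).map
          (fun q => (((wn.flatMap (fun name => pvPrefixList (PySem.Str.split₀ name))).count q.2 : Int),
            q.1, q.2)) := by
    rw [PySem.Dict.items_counter, ← PySem.List.dedup_eq_ofList, pvEnumerateMap, List.map_map]
    rfl
  rw [hLA]
  have hTw : ∀ p ∈ pvT wn, ∀ w ∈ p, pvWordlike w := by
    intro p hp w hw
    obtain ⟨n, hn, hpn⟩ := List.mem_flatMap.mp hp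
    exact pvSplit₀Wordlike n w ((pvNpfxMem _ p hpn).2 w hw)
  have hS : wn.flatMap (fun name => pvPrefixList (PySem.Str.split₀ name))
      = (pvT wn).map pvJoinAll := by
    unfold pvT
    rw [List.map_flatMap]
    rw [show (fun name => pvPrefixList (PySem.Str.split₀ name))
        = (fun name => (pvNpfx (PySem.Str.split₀ name)).map pvJoinAll)
      from funext (fun n => pvPrefixListEqNpfx _)]
  have hinjT : ∀ x ∈ pvT wn, ∀ y ∈ pvT wn, pvJoinAll x = pvJoinAll y → x = y :=
    fun x hx y hy hxy => pvJoinInj x y (hTw x hx) (hTw y hy) hxy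
  have hded : PySem.List.dedup ((pvT wn).map pvJoinAll)
      = (PySem.List.dedup (pvT wn)).map pvJoinAll :=
    pvDedupMapInj pvJoinAll (pvT wn) hinjT
  have hLA2 : (PySem.List.enumerate (PySem.List.dedup
          (wn.flatMap (fun name => pvPrefixList (PySem.Str.split₀ name)))) 0).map
          (fun q => (((wn.flatMap (fun name => pvPrefixList (PySem.Str.split₀ name))).count q.2 : Int),
            q.1, q.2))
      = (pvAnnot (pvT wn)).map (fun e => (e.1, e.2.1, pvJoinAll e.2.2)) := by
    rw [hS, hded, pvEnumerateMap]
    unfold pvAnnot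
    rw [List.map_map, List.map_map]
    refine List.map_congr_left ?_
    intro q hq
    obtain ⟨k, hk, hqe⟩ := (PySem.List.mem_enumerate_iff _ _ _).mp hq
    have hq2 : q.2 ∈ PySem.List.dedup (pvT wn) := by
      rw [hqe]; exact List.getElem_mem hk
    have hq2T : q.2 ∈ pvT wn := by
      rw [PySem.List.dedup_eq_ofList, PySem.Set.mem_ofList] at hq2
      exact hq2
    have hcnt : ((pvT wn).map pvJoinAll).count (pvJoinAll q.2) = (pvT wn).count q.2 :=
      pvCountMapInj pvJoinAll (pvT wn) q.2 (fun x hx hxy => hinjT x hx q.2 hq2T hxy)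
    simp only [Function.comp]
    rw [hcnt]
  rw [hLA2]
  obtain ⟨hwf, hctr, hperm⟩ := pvBuildInv wn
  have hbridge : pvFlat (wn.foldl (fun (st : PvTrie × Int) name =>
        pvInsert (PySem.Str.split₀ name) st.1 st.2) (PvTrie.nil, 0)).1 ""
      = (pvFlatW (wn.foldl (fun (st : PvTrie × Int) name =>
        pvInsert (PySem.Str.split₀ name) st.1 st.2) (PvTrie.nil, 0)).1 []).map
          (fun e => (e.1, e.2.1, pvJoinAll e.2.2)) :=
    pvFlatBridge _ [] hwf (by simp)
  have hpermS : (pvFlat (wn.foldl (fun (st : PvTrie × Int) name =>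
        pvInsert (PySem.Str.split₀ name) st.1 st.2) (PvTrie.nil, 0)).1 "").Perm
      ((pvAnnot (pvT wn)).map (fun e => (e.1, e.2.1, pvJoinAll e.2.2))) := by
    rw [hbridge]
    exact hperm.map _
  have hpair : ((pvAnnot (pvT wn)).map (fun e => (e.1, e.2.1, pvJoinAll e.2.2))).Pairwise
      (fun a b => a.2.1 < b.2.1) := by
    unfold pvAnnot
    rw [List.map_map, List.pairwise_map]
    exact PySem.List.pairwise_lt_enumerate _ _
  have hinj := pvPairwiseInj (fun (e : Int × Int × String) => e.2.1) _ hpair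
  have hsel : pvSel ((pvAnnot (pvT wn)).map (fun e => (e.1, e.2.1, pvJoinAll e.2.2)))
      = pvSel (pvFlat (wn.foldl (fun (st : PvTrie × Int) name =>
        pvInsert (PySem.Str.split₀ name) st.1 st.2) (PvTrie.nil, 0)).1 "") :=
    pvSelPerm _ _ hpermS.symm hinj
  show (match Option.map (fun (t : Int × Int × String) => (t.2.2, t.1))
      (pvSel ((pvAnnot (pvT wn)).map (fun e => (e.1, e.2.1, pvJoinAll e.2.2)))) with
    | none => "Not Found"
    | some q => q.1)
    = (match pvSel (pvFlat (wn.foldl (fun (st : PvTrie × Int) name =>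
        pvInsert (PySem.Str.split₀ name) st.1 st.2) (PvTrie.nil, 0)).1 "") with
    | none => "Not Found"
    | some t => t.2.2)
  rw [← hsel]
  cases pvSel ((pvAnnot (pvT wn)).map (fun e => (e.1, e.2.1, pvJoinAll e.2.2))) with
  | none => rfl
  | some t => rfl
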